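-- pv_equiv track=rewrite | github.com/jayaddison/adventofcode | 16/16b.py | process_literal
-- ===== SOURCE A (Python) =====
-- def number(bitstring):
--     return int(bitstring, base=2)
--
-- def process_literal(payload):
--     bitstring = []
--     index = 0
--     done = False
--     while not done:
--         done = payload[index] == "0"
--         bitstring.append(payload[index + 1:index + 5])
--         index += 5
--     while index % 5 and payload[index] == "0":
--         index += 1
--     return index, number("".join(bitstring))
-- ===== SOURCE B (Python) =====
-- def process_literal(payload):
--     # Phase 1: locate the terminating group (leader bit "0") by scanning leaders only.
--     k = 0
--     while payload[5 * k] != "0":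
--         k += 1
--     end = 5 * k + 5
--     # Phase 2: accumulate the numeric value group by group, no intermediate list.
--     value = 0
--     i = 0
--     while i < end:
--         bits = payload[i + 1:i + 5]
--         if bits:
--             value = value * 2 ** len(bits) + int(bits, 2)
--         i += 5
--     return end, value
-- ===== Notes on version B (the rewrite author's own statement) =====
-- stated objective: alternative
-- what changed: A interleaves one loop that collects 4-bit slices into a list and parses their concatenation with int(_,2) at the end; B first scans only the leader bits to find the terminating group, then folds the groups into an integer accumulator with no intermediate list.
-- outside the precondition, e.g. on process_literal('1+1100'): A returns (10, 6), B returns (10, 6); on process_literal('111110 '): A returns (10, 15), B raises ValueError; on process_literal('0'): A raises ValueError, B returns (5, 0)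
import Mathlib
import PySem

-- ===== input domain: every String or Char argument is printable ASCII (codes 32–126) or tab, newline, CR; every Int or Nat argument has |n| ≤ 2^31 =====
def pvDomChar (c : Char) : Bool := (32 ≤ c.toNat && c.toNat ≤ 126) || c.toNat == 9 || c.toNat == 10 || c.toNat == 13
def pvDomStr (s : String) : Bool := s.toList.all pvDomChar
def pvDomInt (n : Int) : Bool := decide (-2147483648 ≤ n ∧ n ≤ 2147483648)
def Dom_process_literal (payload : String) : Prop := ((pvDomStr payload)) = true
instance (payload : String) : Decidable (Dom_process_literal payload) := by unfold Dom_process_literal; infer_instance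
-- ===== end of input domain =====

-- B replaces A's collect-slices-then-parse loop by a find-the-terminator scan followed by a
-- numeric accumulator (no intermediate list); objective: alternative/idiomatic, return value only.

-- ===== PORT A =====
-- hand port of Python's int(s, base=2) ('number' in A, 'int(bits, 2)' in B):
-- exact on nonempty strings of '0'/'1' characters, which Pre_process_literal guarantees
def pvBit (v : Int) (c : Char) : Int := 2 * v + (if c = '1' then 1 else 0)
def pvBinVal (bs : List Char) : Int := bs.foldl pvBit 0

-- payload[i+1:i+5] (both Pythons write exactly this slice)
def pvGrp (l : List Char) (i : Nat) : List Char :=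
  PySem.List.slice l (some ((i : Int) + 1)) (some ((i : Int) + 5))

-- A's first while loop: read the leader bit, append the 4-bit slice, advance by 5
def pvALoop (l : List Char) (index : Nat) (acc : List Char) : Option (Nat × List Char) :=
  if h : index < l.length then
    if l[index] = '0' then some (index + 5, acc ++ pvGrp l index)
    else pvALoop l (index + 5) (acc ++ pvGrp l index)
  else none          -- payload[index] raises IndexError in Python (outside Pre_)
termination_by l.length - index
decreasing_by omega

-- A's second while loop: while index % 5 and payload[index] == "0": index += 1
def pvASkip (l : List Char) (index : Nat) : Nat :=
  if index % 5 ≠ 0 ∧ PySem.List.pyGet? l (index : Int) = some '0' then pvASkip l (index + 1)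
  else index
termination_by (5 - index % 5) % 5
decreasing_by omega

def process_literal (payload : String) : Int × Int :=
  match pvALoop payload.toList 0 [] with
  | some (idx, bits) => ((pvASkip payload.toList idx : Nat), pvBinVal bits)
  | none => (0, 0)   -- IndexError path, outside Pre_

-- ===== PORT B =====
-- Source B phase 1: while payload[5*k] != "0": k += 1
def pvBFind (l : List Char) (k : Nat) : Option Nat :=
  if h : 5 * k < l.length then
    if l[5 * k] ≠ '0' then pvBFind l (k + 1) else some k
  else none          -- IndexError in Python (outside Pre_)
termination_by l.length - 5 * k
decreasing_by omega

-- Source B phase 2: accumulate value group by group up to fin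
def pvBVal (l : List Char) (i fin : Nat) (v : Int) : Int :=
  if i < fin then
    pvBVal l (i + 5) fin
      (if pvGrp l i ≠ [] then v * 2 ^ (pvGrp l i).length + pvBinVal (pvGrp l i) else v)
  else v
termination_by fin - i
decreasing_by omega

def process_literal_alt (payload : String) : Int × Int :=
  match pvBFind payload.toList 0 with
  | some k => (((5 * k + 5 : Nat) : Int), pvBVal payload.toList 0 (5 * k + 5) 0)
  | none => (0, 0)

-- ===== PRECONDITION & SPEC =====
-- Pre_ excludes (a) inputs where A raises (no '0' leader reached before the string ends, or an
-- empty collected bitstring), and (b) inputs A returns on only because int(_,2) tolerates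
-- whitespace/sign/'0b' inside the collected slices, which the hand port pvBinVal does not model.
def Pre_process_literal (payload : String) : Prop :=
  2 ≤ payload.toList.length ∧
  ∃ k < payload.toList.length, 5 * k < payload.toList.length ∧
    payload.toList.getD (5 * k) ' ' = '0' ∧
    (∀ j < k, payload.toList.getD (5 * j) ' ' ≠ '0') ∧
    (∀ i < min (5 * k + 5) payload.toList.length, i % 5 ≠ 0 →
      (payload.toList.getD i ' ' = '0' ∨ payload.toList.getD i ' ' = '1'))
instance (payload : String) : Decidable (Pre_process_literal payload) := by
  unfold Pre_process_literal; infer_instance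

def pvWitness_process_literal : String := "110100"

def Spec_process_literal (payload : String) (out : Int × Int) : Prop := out = process_literal_alt payload
instance (payload : String) (out : Int × Int) : Decidable (Spec_process_literal payload out) := by unfold Spec_process_literal; infer_instance

-- ===== CLAIM (what is proved, stated in full; the proofs are below) =====
def Claim_equal_process_literal : Prop := ∀ (payload : String), Dom_process_literal payload → Pre_process_literal payload → Spec_process_literal payload (process_literal payload)

-- ===== LEMMAS AND PROOFS =====

lemma pvBinVal_foldl (bs : List Char) (v : Int) :
    bs.foldl pvBit v = v * 2 ^ bs.length + pvBinVal bs := by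
  induction bs generalizing v with
  | nil => simp [pvBinVal]
  | cons c bs ih =>
    simp only [List.foldl_cons, List.length_cons, pvBinVal] at *
    rw [ih (pvBit v c), ih (pvBit 0 c)]
    simp only [pvBit]
    ring

lemma pvASkip_mul5 (l : List Char) (n : Nat) (h : n % 5 = 0) : pvASkip l n = n := by
  rw [pvASkip]; simp [h]

-- joint loop lemma: from group k' up to the terminating group k, A's loop collects exactly the
-- list 'rest' of bit characters and B's value loop folds pvBit over that same list
lemma pvJoint (l : List Char) (k : Nat) (hk : 5 * k < l.length) (h0 : l[5 * k] = '0')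
    (hmin : ∀ j < k, l.getD (5 * j) ' ' ≠ '0') :
    ∀ d k', k' + d = k → ∃ rest,
      (∀ acc, pvALoop l (5 * k') acc = some (5 * k + 5, acc ++ rest)) ∧
      (∀ v, pvBVal l (5 * k') (5 * k + 5) v = rest.foldl pvBit v) := by
  intro d
  induction d with
  | zero =>
    intro k' hk'
    have hkk : k' = k := by omega
    subst hkk
    refine ⟨pvGrp l (5 * k'), ?_, ?_⟩
    · intro acc
      rw [pvALoop]
      simp [hk, h0]
    · intro v
      rw [pvBVal]
      simp only [show 5 * k' < 5 * k' + 5 by omega, if_pos]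
      rw [pvBVal]
      simp only [show ¬ (5 * k' + 5 < 5 * k' + 5) by omega, if_neg, not_false_iff]
      by_cases hb : pvGrp l (5 * k') = []
      · simp [hb]
      · simp [hb, pvBinVal_foldl]
  | succ d ih =>
    intro k' hk'
    have hlt : k' < k := by omega
    have hrange : 5 * k' < l.length := by omega
    have hne : l[5 * k'] ≠ '0' := by
      have := hmin k' hlt
      rwa [List.getD_eq_getElem l ' ' hrange] at this
    obtain ⟨rest', hA, hB⟩ := ih (k' + 1) (by omega)
    refine ⟨pvGrp l (5 * k') ++ rest', ?_, ?_⟩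
    · intro acc
      rw [pvALoop]
      simp only [hrange, dif_pos, hne, if_neg, not_false_iff]
      have h5 : 5 * k' + 5 = 5 * (k' + 1) := by omega
      rw [h5, hA (acc ++ pvGrp l (5 * k')), List.append_assoc]
    · intro v
      rw [pvBVal]
      simp only [show 5 * k' < 5 * k + 5 by omega, if_pos]
      have h5 : 5 * k' + 5 = 5 * (k' + 1) := by omega
      rw [h5, hB, List.foldl_append]
      by_cases hb : pvGrp l (5 * k') = []
      · simp [hb]
      · simp [hb, pvBinVal_foldl]

lemma pvBFind_eq (l : List Char) (k : Nat) (hk : 5 * k < l.length) (h0 : l[5 * k] = '0')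
    (hmin : ∀ j < k, l.getD (5 * j) ' ' ≠ '0') :
    ∀ d k', k' + d = k → pvBFind l k' = some k := by
  intro d
  induction d with
  | zero =>
    intro k' hk'
    have hkk : k' = k := by omega
    subst hkk
    rw [pvBFind]
    simp [hk, h0]
  | succ d ih =>
    intro k' hk'
    have hlt : k' < k := by omega
    have hrange : 5 * k' < l.length := by omega
    have hne : l[5 * k'] ≠ '0' := by
      have := hmin k' hlt
      rwa [List.getD_eq_getElem l ' ' hrange] at this
    rw [pvBFind]
    simp only [hrange, dif_pos, hne, if_pos, ne_eq, not_false_iff]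
    exact ih (k' + 1) (by omega)

-- ===== VERDICT (by name: the statement is the Claim_ definition above) =====
theorem process_literal_spec : Claim_equal_process_literal := by
  intro payload _hDom hPre
  obtain ⟨_hlen, k, _hk1, hk, h0, hmin, _hbits⟩ := hPre
  set l := payload.toList with hl
  have h0' : l[5 * k] = '0' := by
    rw [← List.getD_eq_getElem l ' ' hk]; exact h0
  obtain ⟨rest, hA, hB⟩ := pvJoint l k hk h0' hmin k 0 (by omega)
  have hFind := pvBFind_eq l k hk h0' hmin k 0 (by omega)
  unfold Spec_process_literal process_literal process_literal_alt
  rw [← hl]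
  have hA0 : pvALoop l 0 [] = some (5 * k + 5, rest) := by
    have := hA []
    simpa using this
  rw [hA0, hFind]
  simp only
  rw [pvASkip_mul5 l (5 * k + 5) (by omega)]
  have hB0 : pvBVal l 0 (5 * k + 5) 0 = pvBinVal rest := by
    have := hB 0
    simpa [pvBinVal] using this
  rw [hB0]
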